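-- pv_equiv track=rewrite | github.com/pypi-data/pypi-mirror-95 | packages/sphinx-interrogatedb/sphinx_interrogatedb-1.3.0-py3-none-any.whl/sphinx_interrogatedb/idb.py | _translate_function_name
-- ===== SOURCE A (Python) =====
-- import keyword
--
-- METHOD_RENAME_DICT = {
--     "operator ==": "__eq__",
--     "operator !=": "__ne__",
--     "operator << ": "__lshift__",
--     "operator >>": "__rshift__",
--     "operator <": "__lt__",
--     "operator >": "__gt__",
--     "operator <=": "__le__",
--     "operator >=": "__ge__",
--     "operator =": "assign",
--     "operator ()": "__call__",
--     "operator []": "__getitem__",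
--     "operator ++unary": "increment",
--     "operator ++": "increment",
--     "operator --unary": "decrement",
--     "operator --": "decrement",
--     "operator ^": "__xor__",
--     "operator %": "__mod__",
--     "operator !": "logicalNot",
--     "operator ~unary": "__invert__",
--     "operator &": "__and__",
--     "operator &&": "logicalAnd",
--     "operator |": "__or__",
--     "operator ||": "logicalOr",
--     "operator +": "__add__",
--     "operator -": "__sub__",
--     "operator -unary": "__neg__",
--     "operator *": "__mul__",
--     "operator /": "__div__",
--     "operator +=": "__iadd__",
--     "operator -=": "__isub__",
--     "operator *=": "__imul__",
--     "operator /=": "__idiv__",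
--     "operator ,": "concatenate",
--     "operator |=": "__ior__",
--     "operator &=": "__iand__",
--     "operator ^=": "__ixor__",
--     "operator ~=": "bitwiseNotEqual",
--     "operator ->": "dereference",
--     "operator <<=": "__ilshift__",
--     "operator >>=": "__irshift__",
--     "operator typecast bool": "__nonzero__",
--     "__nonzero__": "__nonzero__",
--     "__reduce__": "__reduce__",
--     "__reduce_persist__": "__reduce_persist__",
--     "__copy__": "__copy__",
--     "__deepcopy__": "__deepcopy__",
--     "print": "Cprint",
--     "CInterval.set_t": "_priv__cSetT",
-- }
--
-- def _translate_function_name(name, mangle=False):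
--     # More-or-less esquivalent to C++ methodNameFromCppName
--     if name.startswith("__"):
--         return name
--
--     if name in METHOD_RENAME_DICT:
--         return METHOD_RENAME_DICT[name]
--
--     method_name = ""
--     bad_chars = "!@#$%^&*()<>,.-=+~{}? "
--     next_cap = False
--
--     for chr in name:
--         if (chr == '_' or chr == ' ') and mangle:
--             next_cap = True
--         elif chr in bad_chars:
--             if not mangle:
--                 method_name += '_'
--         elif next_cap:
--             method_name += chr.upper()
--             next_cap = False
--         else:
--             method_name += chr
--
--     # Mangle names that happen to be python keywords so they are not anymore
--     if keyword.iskeyword(method_name):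
--         return '_' + method_name
--     else:
--         return method_name
-- ===== SOURCE B (Python) =====
-- # B: two-level table lookup ("operator "-prefix split) + delete/split/capitalize-rejoin
-- # builder instead of A's flat 48-key dict and per-character next_cap state machine.
--
-- OPERATOR_RENAME = {
--     "==": "__eq__", "!=": "__ne__", "<< ": "__lshift__", ">>": "__rshift__",
--     "<": "__lt__", ">": "__gt__", "<=": "__le__", ">=": "__ge__",
--     "=": "assign", "()": "__call__", "[]": "__getitem__",
--     "++unary": "increment", "++": "increment",
--     "--unary": "decrement", "--": "decrement",
--     "^": "__xor__", "%": "__mod__", "!": "logicalNot", "~unary": "__invert__",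
--     "&": "__and__", "&&": "logicalAnd", "|": "__or__", "||": "logicalOr",
--     "+": "__add__", "-": "__sub__", "-unary": "__neg__",
--     "*": "__mul__", "/": "__div__",
--     "+=": "__iadd__", "-=": "__isub__", "*=": "__imul__", "/=": "__idiv__",
--     ",": "concatenate", "|=": "__ior__", "&=": "__iand__", "^=": "__ixor__",
--     "~=": "bitwiseNotEqual", "->": "dereference",
--     "<<=": "__ilshift__", ">>=": "__irshift__",
--     "typecast bool": "__nonzero__",
-- }
--
-- SPECIAL_RENAME = {
--     "print": "Cprint",
--     "CInterval.set_t": "_priv__cSetT",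
-- }
--
-- BAD_CHARS = "!@#$%^&*()<>,.-=+~{}? "
--
-- KEYWORDS = ("False None True and as assert async await break class continue "
--             "def del elif else except finally for from global if import in is "
--             "lambda nonlocal not or pass raise return try while with yield").split()
--
--
-- def _translate_function_name(name, mangle=False):
--     if name.startswith("__"):
--         return name
--
--     if name.startswith("operator "):
--         renamed = OPERATOR_RENAME.get(name[9:])
--     else:
--         renamed = SPECIAL_RENAME.get(name)
--     if renamed is not None:
--         return renamed
--
--     if mangle:
--         # drop the non-separator bad characters, then camel-case on '_'/' '
--         cleaned = name.translate({ord(c): None for c in BAD_CHARS if c != ' '})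
--         segs = cleaned.replace(' ', '_').split('_')
--         method_name = segs[0] + ''.join(s[:1].upper() + s[1:] for s in segs[1:])
--     else:
--         method_name = name.translate({ord(c): ord('_') for c in BAD_CHARS})
--
--     if method_name in KEYWORDS:
--         return '_' + method_name
--     return method_name
-- ===== Notes on version B (the rewrite author's own statement) =====
-- stated objective: faster
-- what changed: The flat 48-key rename dict becomes a two-level lookup keyed by the operator prefix, the per-character next_cap state machine becomes a delete/split/capitalize-rejoin builder on C-level str builtins, and the keyword check uses one split string instead of keyword.iskeyword; same O(n) asymptotics, large measured constant-factor speedup.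
import Mathlib
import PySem

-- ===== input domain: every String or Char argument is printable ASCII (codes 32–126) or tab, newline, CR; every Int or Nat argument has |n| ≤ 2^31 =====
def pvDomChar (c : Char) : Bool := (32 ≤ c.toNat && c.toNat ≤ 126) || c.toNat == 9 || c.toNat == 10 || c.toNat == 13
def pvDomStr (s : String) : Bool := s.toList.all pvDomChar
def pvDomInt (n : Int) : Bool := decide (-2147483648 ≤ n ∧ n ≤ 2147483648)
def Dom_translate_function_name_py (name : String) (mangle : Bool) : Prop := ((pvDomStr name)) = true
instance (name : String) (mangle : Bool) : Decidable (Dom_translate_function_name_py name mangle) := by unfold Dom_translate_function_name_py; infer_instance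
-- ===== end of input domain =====

-- B replaces A's flat 48-key rename dict by a two-level operator-prefix lookup,
-- A's per-character next_cap state machine by a delete/split/capitalize-rejoin
-- builder, and the keyword list by one split string (objective: faster, measured).

-- ===== PORT A =====
-- A carries one flat dict literal, the keyword list from 'import keyword', and bad_chars
def renameList : List (String × String) :=
  [("operator ==", "__eq__"),
   ("operator !=", "__ne__"),
   ("operator << ", "__lshift__"),
   ("operator >>", "__rshift__"),
   ("operator <", "__lt__"),
   ("operator >", "__gt__"),
   ("operator <=", "__le__"),
   ("operator >=", "__ge__"),
   ("operator =", "assign"),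
   ("operator ()", "__call__"),
   ("operator []", "__getitem__"),
   ("operator ++unary", "increment"),
   ("operator ++", "increment"),
   ("operator --unary", "decrement"),
   ("operator --", "decrement"),
   ("operator ^", "__xor__"),
   ("operator %", "__mod__"),
   ("operator !", "logicalNot"),
   ("operator ~unary", "__invert__"),
   ("operator &", "__and__"),
   ("operator &&", "logicalAnd"),
   ("operator |", "__or__"),
   ("operator ||", "logicalOr"),
   ("operator +", "__add__"),
   ("operator -", "__sub__"),
   ("operator -unary", "__neg__"),
   ("operator *", "__mul__"),
   ("operator /", "__div__"),
   ("operator +=", "__iadd__"),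
   ("operator -=", "__isub__"),
   ("operator *=", "__imul__"),
   ("operator /=", "__idiv__"),
   ("operator ,", "concatenate"),
   ("operator |=", "__ior__"),
   ("operator &=", "__iand__"),
   ("operator ^=", "__ixor__"),
   ("operator ~=", "bitwiseNotEqual"),
   ("operator ->", "dereference"),
   ("operator <<=", "__ilshift__"),
   ("operator >>=", "__irshift__"),
   ("operator typecast bool", "__nonzero__"),
   ("__nonzero__", "__nonzero__"),
   ("__reduce__", "__reduce__"),
   ("__reduce_persist__", "__reduce_persist__"),
   ("__copy__", "__copy__"),
   ("__deepcopy__", "__deepcopy__"),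
   ("print", "Cprint"),
   ("CInterval.set_t", "_priv__cSetT")]

def renameDict : PySem.Dict String String := PySem.Dict.ofList renameList

def pyKwList : List String :=
  ["False", "None", "True", "and", "as", "assert", "async", "await", "break",
   "class", "continue", "def", "del", "elif", "else", "except", "finally",
   "for", "from", "global", "if", "import", "in", "is", "lambda", "nonlocal",
   "not", "or", "pass", "raise", "return", "try", "while", "with", "yield"]

def badChars : List Char := "!@#$%^&*()<>,.-=+~{}? ".toList

-- A's for-loop over name, state = (method_name, next_cap);
-- chr.upper() on one char is PySem.Chars.upperChar (exact on the ASCII domain)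
def loopA (mangle : Bool) : List Char → List Char → Bool → List Char
  | [], acc, _ => acc
  | c :: cs, acc, cap =>
    if (c = '_' ∨ c = ' ') ∧ mangle = true then loopA mangle cs acc true
    else if c ∈ badChars then
      (if mangle = false then loopA mangle cs (acc ++ ['_']) cap else loopA mangle cs acc cap)
    else if cap then loopA mangle cs (acc ++ [PySem.Chars.upperChar c]) false
    else loopA mangle cs (acc ++ [c]) false

def translate_function_name_py (name : String) (mangle : Bool) : String :=
  if PySem.Str.startswith name "__" then name
  else match renameDict.get? name with
    | some v => v
    | none =>
      let method_name := String.mk (loopA mangle name.toList [] false)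
      if method_name ∈ pyKwList then "_" ++ method_name else method_name

-- ===== PORT B =====
-- B's tables: operator suffixes and the two non-operator specials
def opDict : PySem.Dict String String := PySem.Dict.ofList
  [("==", "__eq__"),
   ("!=", "__ne__"),
   ("<< ", "__lshift__"),
   (">>", "__rshift__"),
   ("<", "__lt__"),
   (">", "__gt__"),
   ("<=", "__le__"),
   (">=", "__ge__"),
   ("=", "assign"),
   ("()", "__call__"),
   ("[]", "__getitem__"),
   ("++unary", "increment"),
   ("++", "increment"),
   ("--unary", "decrement"),
   ("--", "decrement"),
   ("^", "__xor__"),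
   ("%", "__mod__"),
   ("!", "logicalNot"),
   ("~unary", "__invert__"),
   ("&", "__and__"),
   ("&&", "logicalAnd"),
   ("|", "__or__"),
   ("||", "logicalOr"),
   ("+", "__add__"),
   ("-", "__sub__"),
   ("-unary", "__neg__"),
   ("*", "__mul__"),
   ("/", "__div__"),
   ("+=", "__iadd__"),
   ("-=", "__isub__"),
   ("*=", "__imul__"),
   ("/=", "__idiv__"),
   (",", "concatenate"),
   ("|=", "__ior__"),
   ("&=", "__iand__"),
   ("^=", "__ixor__"),
   ("~=", "bitwiseNotEqual"),
   ("->", "dereference"),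
   ("<<=", "__ilshift__"),
   (">>=", "__irshift__"),
   ("typecast bool", "__nonzero__")]

def specialDict : PySem.Dict String String := PySem.Dict.ofList
  [("print", "Cprint"), ("CInterval.set_t", "_priv__cSetT")]

def kwString : String :=
  "False None True and as assert async await break class continue def del elif else except finally for from global if import in is lambda nonlocal not or pass raise return try while with yield"

-- s[:1].upper() + s[1:]
def cap1 : List Char → List Char
  | [] => []
  | c :: cs => PySem.Chars.upperChar c :: cs

-- str.split('_') (keeps empty segments; always returns at least one segment)
def splitU : List Char → List (List Char)
  | [] => [[]]
  | c :: cs =>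
    if c = '_' then [] :: splitU cs
    else match splitU cs with
      | [] => [[c]]   -- unreachable: splitU never returns []
      | s :: t => (c :: s) :: t

def translate_function_name_py_alt (name : String) (mangle : Bool) : String :=
  if PySem.Str.startswith name "__" then name
  else match
    (if PySem.Str.startswith name "operator "
     then opDict.get? (PySem.Str.slice name (some (9:Int)) none)   -- name[9:]
     else specialDict.get? name) with
    | some v => v
    | none =>
      let method_name :=
        if mangle then
          -- name.translate deleting bad chars except ' ', then .replace(' ','_').split('_')
          let cleaned := name.toList.filter (fun c => ¬ (c ∈ badChars ∧ c ≠ ' '))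
          let segs := splitU (cleaned.map (fun c => if c = ' ' then '_' else c))
          String.mk (segs.headD [] ++ (segs.tail.map cap1).flatten)
        else
          String.mk (name.toList.map (fun c => if c ∈ badChars then '_' else c))
      if method_name ∈ PySem.Str.split₀ kwString then "_" ++ method_name else method_name

-- ===== PRECONDITION & SPEC =====
def Spec_translate_function_name_py (name : String) (mangle : Bool) (out : String) : Prop := out = translate_function_name_py_alt name mangle
instance (name : String) (mangle : Bool) (out : String) : Decidable (Spec_translate_function_name_py name mangle out) := by unfold Spec_translate_function_name_py; infer_instance

-- ===== CLAIM (what is proved, stated in full; the proofs are below) =====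
def Claim_equal_translate_function_name_py : Prop := ∀ (name : String) (mangle : Bool), Dom_translate_function_name_py name mangle → Spec_translate_function_name_py name mangle (translate_function_name_py name mangle)

-- ===== LEMMAS AND PROOFS =====
-- a full key "p ++ k" matches s iff s starts with p and s[|p|:] matches k
theorem keyEq (p k s : String) (n : Nat) (hn : p.toList.length = n) :
    ((p ++ k) == s) = (PySem.Str.startswith s p && (k == PySem.Str.slice s (some (n:Int)) none)) := by
  rw [Bool.eq_iff_iff]
  simp only [beq_iff_eq, Bool.and_eq_true, PySem.Str.startswith_eq, PySem.Chars.startswith_iff,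
    String.ext_iff, String.toList_append, PySem.Str.toList_slice, PySem.Chars.slice_eq_listSlice,
    PySem.List.slice_from_natCast]
  constructor
  · intro h
    refine ⟨⟨k.toList, h⟩, ?_⟩
    rw [← h, ← hn, List.drop_left]
  · rintro ⟨⟨t, ht⟩, h⟩
    rw [← ht, ← hn, List.drop_left] at h
    rw [h, ht]

-- a key that does not start with "operator " never equals an s that does
theorem neqKey (t s : String) (hf : PySem.Str.startswith t "operator " = false)
    (ht : PySem.Str.startswith s "operator " = true) : (t == s) = false := by
  rw [Bool.eq_false_iff]
  intro h
  rw [beq_iff_eq] at h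
  rw [h, ht] at hf
  exact absurd hf (by simp)

-- A's flat dict lookup = B's two-level lookup (away from the "__" early return)
set_option maxRecDepth 16384 in
theorem lookup_eq (s : String) (h2 : PySem.Str.startswith s "__" = false) :
    renameDict.get? s =
      (if PySem.Str.startswith s "operator "
       then opDict.get? (PySem.Str.slice s (some (9:Int)) none)
       else specialDict.get? s) := by
    have e0 : (("operator ==" : String) == s) = (PySem.Str.startswith s "operator " && (("==" : String) == PySem.Str.slice s (some (9:Int)) none)) := by
      rw [show ("operator ==" : String) = "operator " ++ "==" from rfl]
      simpa using keyEq "operator " "==" s 9 rfl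
    have e1 : (("operator !=" : String) == s) = (PySem.Str.startswith s "operator " && (("!=" : String) == PySem.Str.slice s (some (9:Int)) none)) := by
      rw [show ("operator !=" : String) = "operator " ++ "!=" from rfl]
      simpa using keyEq "operator " "!=" s 9 rfl
    have e2 : (("operator << " : String) == s) = (PySem.Str.startswith s "operator " && (("<< " : String) == PySem.Str.slice s (some (9:Int)) none)) := by
      rw [show ("operator << " : String) = "operator " ++ "<< " from rfl]
      simpa using keyEq "operator " "<< " s 9 rfl
    have e3 : (("operator >>" : String) == s) = (PySem.Str.startswith s "operator " && ((">>" : String) == PySem.Str.slice s (some (9:Int)) none)) := by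
      rw [show ("operator >>" : String) = "operator " ++ ">>" from rfl]
      simpa using keyEq "operator " ">>" s 9 rfl
    have e4 : (("operator <" : String) == s) = (PySem.Str.startswith s "operator " && (("<" : String) == PySem.Str.slice s (some (9:Int)) none)) := by
      rw [show ("operator <" : String) = "operator " ++ "<" from rfl]
      simpa using keyEq "operator " "<" s 9 rfl
    have e5 : (("operator >" : String) == s) = (PySem.Str.startswith s "operator " && ((">" : String) == PySem.Str.slice s (some (9:Int)) none)) := by
      rw [show ("operator >" : String) = "operator " ++ ">" from rfl]
      simpa using keyEq "operator " ">" s 9 rfl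
    have e6 : (("operator <=" : String) == s) = (PySem.Str.startswith s "operator " && (("<=" : String) == PySem.Str.slice s (some (9:Int)) none)) := by
      rw [show ("operator <=" : String) = "operator " ++ "<=" from rfl]
      simpa using keyEq "operator " "<=" s 9 rfl
    have e7 : (("operator >=" : String) == s) = (PySem.Str.startswith s "operator " && ((">=" : String) == PySem.Str.slice s (some (9:Int)) none)) := by
      rw [show ("operator >=" : String) = "operator " ++ ">=" from rfl]
      simpa using keyEq "operator " ">=" s 9 rfl
    have e8 : (("operator =" : String) == s) = (PySem.Str.startswith s "operator " && (("=" : String) == PySem.Str.slice s (some (9:Int)) none)) := by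
      rw [show ("operator =" : String) = "operator " ++ "=" from rfl]
      simpa using keyEq "operator " "=" s 9 rfl
    have e9 : (("operator ()" : String) == s) = (PySem.Str.startswith s "operator " && (("()" : String) == PySem.Str.slice s (some (9:Int)) none)) := by
      rw [show ("operator ()" : String) = "operator " ++ "()" from rfl]
      simpa using keyEq "operator " "()" s 9 rfl
    have e10 : (("operator []" : String) == s) = (PySem.Str.startswith s "operator " && (("[]" : String) == PySem.Str.slice s (some (9:Int)) none)) := by
      rw [show ("operator []" : String) = "operator " ++ "[]" from rfl]
      simpa using keyEq "operator " "[]" s 9 rfl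
    have e11 : (("operator ++unary" : String) == s) = (PySem.Str.startswith s "operator " && (("++unary" : String) == PySem.Str.slice s (some (9:Int)) none)) := by
      rw [show ("operator ++unary" : String) = "operator " ++ "++unary" from rfl]
      simpa using keyEq "operator " "++unary" s 9 rfl
    have e12 : (("operator ++" : String) == s) = (PySem.Str.startswith s "operator " && (("++" : String) == PySem.Str.slice s (some (9:Int)) none)) := by
      rw [show ("operator ++" : String) = "operator " ++ "++" from rfl]
      simpa using keyEq "operator " "++" s 9 rfl
    have e13 : (("operator --unary" : String) == s) = (PySem.Str.startswith s "operator " && (("--unary" : String) == PySem.Str.slice s (some (9:Int)) none)) := by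
      rw [show ("operator --unary" : String) = "operator " ++ "--unary" from rfl]
      simpa using keyEq "operator " "--unary" s 9 rfl
    have e14 : (("operator --" : String) == s) = (PySem.Str.startswith s "operator " && (("--" : String) == PySem.Str.slice s (some (9:Int)) none)) := by
      rw [show ("operator --" : String) = "operator " ++ "--" from rfl]
      simpa using keyEq "operator " "--" s 9 rfl
    have e15 : (("operator ^" : String) == s) = (PySem.Str.startswith s "operator " && (("^" : String) == PySem.Str.slice s (some (9:Int)) none)) := by
      rw [show ("operator ^" : String) = "operator " ++ "^" from rfl]
      simpa using keyEq "operator " "^" s 9 rfl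
    have e16 : (("operator %" : String) == s) = (PySem.Str.startswith s "operator " && (("%" : String) == PySem.Str.slice s (some (9:Int)) none)) := by
      rw [show ("operator %" : String) = "operator " ++ "%" from rfl]
      simpa using keyEq "operator " "%" s 9 rfl
    have e17 : (("operator !" : String) == s) = (PySem.Str.startswith s "operator " && (("!" : String) == PySem.Str.slice s (some (9:Int)) none)) := by
      rw [show ("operator !" : String) = "operator " ++ "!" from rfl]
      simpa using keyEq "operator " "!" s 9 rfl
    have e18 : (("operator ~unary" : String) == s) = (PySem.Str.startswith s "operator " && (("~unary" : String) == PySem.Str.slice s (some (9:Int)) none)) := by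
      rw [show ("operator ~unary" : String) = "operator " ++ "~unary" from rfl]
      simpa using keyEq "operator " "~unary" s 9 rfl
    have e19 : (("operator &" : String) == s) = (PySem.Str.startswith s "operator " && (("&" : String) == PySem.Str.slice s (some (9:Int)) none)) := by
      rw [show ("operator &" : String) = "operator " ++ "&" from rfl]
      simpa using keyEq "operator " "&" s 9 rfl
    have e20 : (("operator &&" : String) == s) = (PySem.Str.startswith s "operator " && (("&&" : String) == PySem.Str.slice s (some (9:Int)) none)) := by
      rw [show ("operator &&" : String) = "operator " ++ "&&" from rfl]
      simpa using keyEq "operator " "&&" s 9 rfl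
    have e21 : (("operator |" : String) == s) = (PySem.Str.startswith s "operator " && (("|" : String) == PySem.Str.slice s (some (9:Int)) none)) := by
      rw [show ("operator |" : String) = "operator " ++ "|" from rfl]
      simpa using keyEq "operator " "|" s 9 rfl
    have e22 : (("operator ||" : String) == s) = (PySem.Str.startswith s "operator " && (("||" : String) == PySem.Str.slice s (some (9:Int)) none)) := by
      rw [show ("operator ||" : String) = "operator " ++ "||" from rfl]
      simpa using keyEq "operator " "||" s 9 rfl
    have e23 : (("operator +" : String) == s) = (PySem.Str.startswith s "operator " && (("+" : String) == PySem.Str.slice s (some (9:Int)) none)) := by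
      rw [show ("operator +" : String) = "operator " ++ "+" from rfl]
      simpa using keyEq "operator " "+" s 9 rfl
    have e24 : (("operator -" : String) == s) = (PySem.Str.startswith s "operator " && (("-" : String) == PySem.Str.slice s (some (9:Int)) none)) := by
      rw [show ("operator -" : String) = "operator " ++ "-" from rfl]
      simpa using keyEq "operator " "-" s 9 rfl
    have e25 : (("operator -unary" : String) == s) = (PySem.Str.startswith s "operator " && (("-unary" : String) == PySem.Str.slice s (some (9:Int)) none)) := by
      rw [show ("operator -unary" : String) = "operator " ++ "-unary" from rfl]
      simpa using keyEq "operator " "-unary" s 9 rfl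
    have e26 : (("operator *" : String) == s) = (PySem.Str.startswith s "operator " && (("*" : String) == PySem.Str.slice s (some (9:Int)) none)) := by
      rw [show ("operator *" : String) = "operator " ++ "*" from rfl]
      simpa using keyEq "operator " "*" s 9 rfl
    have e27 : (("operator /" : String) == s) = (PySem.Str.startswith s "operator " && (("/" : String) == PySem.Str.slice s (some (9:Int)) none)) := by
      rw [show ("operator /" : String) = "operator " ++ "/" from rfl]
      simpa using keyEq "operator " "/" s 9 rfl
    have e28 : (("operator +=" : String) == s) = (PySem.Str.startswith s "operator " && (("+=" : String) == PySem.Str.slice s (some (9:Int)) none)) := by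
      rw [show ("operator +=" : String) = "operator " ++ "+=" from rfl]
      simpa using keyEq "operator " "+=" s 9 rfl
    have e29 : (("operator -=" : String) == s) = (PySem.Str.startswith s "operator " && (("-=" : String) == PySem.Str.slice s (some (9:Int)) none)) := by
      rw [show ("operator -=" : String) = "operator " ++ "-=" from rfl]
      simpa using keyEq "operator " "-=" s 9 rfl
    have e30 : (("operator *=" : String) == s) = (PySem.Str.startswith s "operator " && (("*=" : String) == PySem.Str.slice s (some (9:Int)) none)) := by
      rw [show ("operator *=" : String) = "operator " ++ "*=" from rfl]
      simpa using keyEq "operator " "*=" s 9 rfl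
    have e31 : (("operator /=" : String) == s) = (PySem.Str.startswith s "operator " && (("/=" : String) == PySem.Str.slice s (some (9:Int)) none)) := by
      rw [show ("operator /=" : String) = "operator " ++ "/=" from rfl]
      simpa using keyEq "operator " "/=" s 9 rfl
    have e32 : (("operator ," : String) == s) = (PySem.Str.startswith s "operator " && (("," : String) == PySem.Str.slice s (some (9:Int)) none)) := by
      rw [show ("operator ," : String) = "operator " ++ "," from rfl]
      simpa using keyEq "operator " "," s 9 rfl
    have e33 : (("operator |=" : String) == s) = (PySem.Str.startswith s "operator " && (("|=" : String) == PySem.Str.slice s (some (9:Int)) none)) := by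
      rw [show ("operator |=" : String) = "operator " ++ "|=" from rfl]
      simpa using keyEq "operator " "|=" s 9 rfl
    have e34 : (("operator &=" : String) == s) = (PySem.Str.startswith s "operator " && (("&=" : String) == PySem.Str.slice s (some (9:Int)) none)) := by
      rw [show ("operator &=" : String) = "operator " ++ "&=" from rfl]
      simpa using keyEq "operator " "&=" s 9 rfl
    have e35 : (("operator ^=" : String) == s) = (PySem.Str.startswith s "operator " && (("^=" : String) == PySem.Str.slice s (some (9:Int)) none)) := by
      rw [show ("operator ^=" : String) = "operator " ++ "^=" from rfl]
      simpa using keyEq "operator " "^=" s 9 rfl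
    have e36 : (("operator ~=" : String) == s) = (PySem.Str.startswith s "operator " && (("~=" : String) == PySem.Str.slice s (some (9:Int)) none)) := by
      rw [show ("operator ~=" : String) = "operator " ++ "~=" from rfl]
      simpa using keyEq "operator " "~=" s 9 rfl
    have e37 : (("operator ->" : String) == s) = (PySem.Str.startswith s "operator " && (("->" : String) == PySem.Str.slice s (some (9:Int)) none)) := by
      rw [show ("operator ->" : String) = "operator " ++ "->" from rfl]
      simpa using keyEq "operator " "->" s 9 rfl
    have e38 : (("operator <<=" : String) == s) = (PySem.Str.startswith s "operator " && (("<<=" : String) == PySem.Str.slice s (some (9:Int)) none)) := by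
      rw [show ("operator <<=" : String) = "operator " ++ "<<=" from rfl]
      simpa using keyEq "operator " "<<=" s 9 rfl
    have e39 : (("operator >>=" : String) == s) = (PySem.Str.startswith s "operator " && ((">>=" : String) == PySem.Str.slice s (some (9:Int)) none)) := by
      rw [show ("operator >>=" : String) = "operator " ++ ">>=" from rfl]
      simpa using keyEq "operator " ">>=" s 9 rfl
    have e40 : (("operator typecast bool" : String) == s) = (PySem.Str.startswith s "operator " && (("typecast bool" : String) == PySem.Str.slice s (some (9:Int)) none)) := by
      rw [show ("operator typecast bool" : String) = "operator " ++ "typecast bool" from rfl]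
      simpa using keyEq "operator " "typecast bool" s 9 rfl
    have d0 : (("__nonzero__" : String) == s) = false := by
      rw [show ("__nonzero__" : String) = "__" ++ "nonzero__" from rfl, keyEq "__" "nonzero__" s 2 rfl, h2]
      simp
    have d1 : (("__reduce__" : String) == s) = false := by
      rw [show ("__reduce__" : String) = "__" ++ "reduce__" from rfl, keyEq "__" "reduce__" s 2 rfl, h2]
      simp
    have d2 : (("__reduce_persist__" : String) == s) = false := by
      rw [show ("__reduce_persist__" : String) = "__" ++ "reduce_persist__" from rfl, keyEq "__" "reduce_persist__" s 2 rfl, h2]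
      simp
    have d3 : (("__copy__" : String) == s) = false := by
      rw [show ("__copy__" : String) = "__" ++ "copy__" from rfl, keyEq "__" "copy__" s 2 rfl, h2]
      simp
    have d4 : (("__deepcopy__" : String) == s) = false := by
      rw [show ("__deepcopy__" : String) = "__" ++ "deepcopy__" from rfl, keyEq "__" "deepcopy__" s 2 rfl, h2]
      simp
    cases hop : PySem.Str.startswith s "operator " with
    | true =>
      have hp : (("print" : String) == s) = false := neqKey _ _ (by decide) hop
      have hc : (("CInterval.set_t" : String) == s) = false := neqKey _ _ (by decide) hop
      rw [show renameDict = PySem.Dict.mk renameList from rfl,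
          show opDict = PySem.Dict.mk
            [("==", "__eq__"),
   ("!=", "__ne__"),
   ("<< ", "__lshift__"),
   (">>", "__rshift__"),
   ("<", "__lt__"),
   (">", "__gt__"),
   ("<=", "__le__"),
   (">=", "__ge__"),
   ("=", "assign"),
   ("()", "__call__"),
   ("[]", "__getitem__"),
   ("++unary", "increment"),
   ("++", "increment"),
   ("--unary", "decrement"),
   ("--", "decrement"),
   ("^", "__xor__"),
   ("%", "__mod__"),
   ("!", "logicalNot"),
   ("~unary", "__invert__"),
   ("&", "__and__"),
   ("&&", "logicalAnd"),
   ("|", "__or__"),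
   ("||", "logicalOr"),
   ("+", "__add__"),
   ("-", "__sub__"),
   ("-unary", "__neg__"),
   ("*", "__mul__"),
   ("/", "__div__"),
   ("+=", "__iadd__"),
   ("-=", "__isub__"),
   ("*=", "__imul__"),
   ("/=", "__idiv__"),
   (",", "concatenate"),
   ("|=", "__ior__"),
   ("&=", "__iand__"),
   ("^=", "__ixor__"),
   ("~=", "bitwiseNotEqual"),
   ("->", "dereference"),
   ("<<=", "__ilshift__"),
   (">>=", "__irshift__"),
   ("typecast bool", "__nonzero__")] from rfl]
      simp only [renameList, PySem.Dict.get?_mk_cons,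
        e0, e1, e2, e3, e4, e5, e6, e7, e8, e9, e10, e11, e12, e13, e14, e15, e16, e17, e18, e19, e20, e21, e22, e23, e24, e25, e26, e27, e28, e29, e30, e31, e32, e33, e34, e35, e36, e37, e38, e39, e40, d0, d1, d2, d3, d4, hp, hc, hop, Bool.true_and, Bool.false_and, if_false, if_true,
        show PySem.Dict.mk ([] : List (String × String)) = PySem.Dict.empty from rfl, PySem.Dict.get?_empty]
      simp
    | false =>
      rw [show renameDict = PySem.Dict.mk renameList from rfl,
          show specialDict = PySem.Dict.mk
            [("print", "Cprint"), ("CInterval.set_t", "_priv__cSetT")] from rfl]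
      simp only [renameList, PySem.Dict.get?_mk_cons,
        e0, e1, e2, e3, e4, e5, e6, e7, e8, e9, e10, e11, e12, e13, e14, e15, e16, e17, e18, e19, e20, e21, e22, e23, e24, e25, e26, e27, e28, e29, e30, e31, e32, e33, e34, e35, e36, e37, e38, e39, e40, d0, d1, d2, d3, d4, hop, Bool.false_and,
        show PySem.Dict.mk ([] : List (String × String)) = PySem.Dict.empty from rfl, PySem.Dict.get?_empty]
      simp

-- camelization of a segment list: first segment verbatim (unless a capital is
-- pending), every later segment through cap1
def camel (cap : Bool) (segs : List (List Char)) : List Char :=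
  if cap then (segs.map cap1).flatten else segs.headD [] ++ (segs.tail.map cap1).flatten

theorem camel_nil_cons (cap : Bool) (t : List (List Char)) :
    camel cap ([] :: t) = camel true t := by
  cases cap <;> simp [camel, cap1]

theorem camel_cons_cons (cap : Bool) (c : Char) (s : List Char) (t : List (List Char)) :
    camel cap ((c :: s) :: t) =
      (if cap then PySem.Chars.upperChar c else c) :: camel false (s :: t) := by
  cases cap <;> simp [camel, cap1]

theorem loopA_acc (mangle : Bool) (cs : List Char) (acc : List Char) (cap : Bool) :
    loopA mangle cs acc cap = acc ++ loopA mangle cs [] cap := by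
  induction cs generalizing acc cap with
  | nil => simp [loopA]
  | cons c cs ih =>
    simp only [loopA]
    split
    · exact ih acc true
    · split
      · split
        · simp only [List.nil_append]; rw [ih (acc ++ ['_']), ih ['_']]; simp
        · exact ih acc cap
      · split
        · simp only [List.nil_append]
          rw [ih (acc ++ [PySem.Chars.upperChar c]), ih [PySem.Chars.upperChar c]]; simp
        · simp only [List.nil_append]; rw [ih (acc ++ [c]), ih [c]]; simp

theorem splitU_ne_nil (cs : List Char) : splitU cs ≠ [] := by
  cases cs with
  | nil => simp [splitU]
  | cons c cs =>
    simp only [splitU]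
    split
    · simp
    · cases h : splitU cs <;> simp

theorem nonmangle_loop (cs : List Char) (acc : List Char) :
    loopA false cs acc false = acc ++ cs.map (fun c => if c ∈ badChars then '_' else c) := by
  induction cs generalizing acc with
  | nil => simp [loopA]
  | cons c cs ih =>
    by_cases hb : c ∈ badChars
    · simp [loopA, hb, ih]
    · simp [loopA, hb, ih]

theorem splitU_cons_ne (c : Char) (hc : c ≠ '_') (cs : List Char) :
    splitU (c :: cs) =
      (match splitU cs with | [] => [[c]] | s :: t => (c :: s) :: t) := by
  simp [splitU, hc]

set_option maxRecDepth 16384 in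
theorem mangle_loop (cs : List Char) (cap : Bool) :
    loopA true cs [] cap =
      camel cap (splitU ((cs.filter (fun c => ¬ (c ∈ badChars ∧ c ≠ ' '))).map
        (fun c => if c = ' ' then '_' else c))) := by
  induction cs generalizing cap with
  | nil => cases cap <;> simp [loopA, splitU, camel, cap1]
  | cons c cs ih =>
    simp only [loopA, List.filter_cons]
    by_cases hsep : c = '_' ∨ c = ' '
    · have hkeep : (decide ¬ (c ∈ badChars ∧ c ≠ ' ')) = true := by
        rcases hsep with h | h <;> subst h
        · decide
        · simp
      have hf : ((if c = ' ' then '_' else c) : Char) = '_' := by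
        rcases hsep with h | h <;> subst h <;> decide
      rw [if_pos (show (c = '_' ∨ c = ' ') ∧ True from ⟨hsep, trivial⟩)]
      rw [hkeep, if_pos rfl]
      simp only [List.map_cons, hf]
      rw [show splitU ('_' :: ((cs.filter (fun c => ¬ (c ∈ badChars ∧ c ≠ ' '))).map
            (fun c => if c = ' ' then '_' else c))) =
          [] :: splitU ((cs.filter (fun c => ¬ (c ∈ badChars ∧ c ≠ ' '))).map
            (fun c => if c = ' ' then '_' else c)) from by simp [splitU]]
      rw [camel_nil_cons]
      exact ih true
    · rw [if_neg (fun h => hsep h.1)]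
      push_neg at hsep
      obtain ⟨hu, hsp⟩ := hsep
      by_cases hb : c ∈ badChars
      · have hkeep : (decide ¬ (c ∈ badChars ∧ c ≠ ' ')) = false := by simp [hb, hsp]
        rw [if_pos hb, if_neg (by simp), hkeep, if_neg (by simp)]
        exact ih cap
      · have hkeep : (decide ¬ (c ∈ badChars ∧ c ≠ ' ')) = true := by simp [hb]
        rw [if_neg hb, hkeep, if_pos rfl]
        simp only [List.map_cons, if_neg hsp, List.nil_append]
        rw [splitU_cons_ne c hu]
        cases hsplit : splitU ((cs.filter (fun c => ¬ (c ∈ badChars ∧ c ≠ ' '))).map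
            (fun c => if c = ' ' then '_' else c)) with
        | nil => exact absurd hsplit (splitU_ne_nil _)
        | cons s t =>
          rw [camel_cons_cons]
          cases cap with
          | false =>
            rw [if_neg (by simp), if_neg (by simp)]
            rw [loopA_acc, ih false, hsplit]
            simp [camel]
          | true =>
            rw [if_pos rfl, if_pos rfl]
            rw [loopA_acc, ih false, hsplit]
            simp [camel]

-- B's one split keyword string lists exactly A's keyword list
set_option maxRecDepth 16384 in
theorem kwSplit_eq : PySem.Str.split₀ kwString = pyKwList := by decide

-- ===== VERDICT (by name: the statement is the Claim_ definition above) =====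
set_option maxRecDepth 16384 in
theorem translate_function_name_py_spec : Claim_equal_translate_function_name_py := by
  intro name mangle _
  unfold Spec_translate_function_name_py translate_function_name_py translate_function_name_py_alt
  cases hsw : PySem.Str.startswith name "__" with
  | true => simp
  | false =>
    simp only [Bool.false_eq_true, if_false]
    rw [← lookup_eq name hsw]
    cases hga : renameDict.get? name with
    | some v => rfl
    | none =>
      simp only []
      have hcore : loopA mangle name.toList [] false =
        (if mangle then
          (let segs := splitU ((name.toList.filter (fun c => ¬ (c ∈ badChars ∧ c ≠ ' '))).map
              (fun c => if c = ' ' then '_' else c));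
           segs.headD [] ++ (segs.tail.map cap1).flatten)
         else name.toList.map (fun c => if c ∈ badChars then '_' else c)) := by
        cases mangle with
        | false => simpa using nonmangle_loop name.toList []
        | true => simpa [camel] using mangle_loop name.toList false
      simp only [hcore, kwSplit_eq]
      split <;> rfl
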